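-- pv_equiv track=rewrite | github.com/rqzz/Anwendungsprojekt-Code_Classification | TrainingData/ai_RRSTONE_2.py | solve
-- ===== SOURCE A (Python) =====
-- def solve(n, k, a):
--     max_val = max(a)
--     min_val = min(a)
--     for i in range(k):
--         if i % 2 == 0:
--             a = [max_val - i for i in a]
--         else:
--             a = [i - min_val for i in a]
--     return a
-- ===== SOURCE B (Python) =====
-- def solve(n, k, a):
--     M = max(a)
--     m = min(a)
--     r = k % 4 if k > 0 else 0
--     if r == 0:
--         return list(a)
--     if r == 1:
--         return [M - x for x in a]
--     if r == 2:
--         return [M - x - m for x in a]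
--     return [m + x for x in a]
-- ===== Notes on version B (the rewrite author's own statement) =====
-- stated objective: faster
-- what changed: The k alternating affine passes have period 4 (max/min are fixed from the original list), so B applies the single composed affine map selected by k % 4 in one pass instead of looping k times.
import Mathlib
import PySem

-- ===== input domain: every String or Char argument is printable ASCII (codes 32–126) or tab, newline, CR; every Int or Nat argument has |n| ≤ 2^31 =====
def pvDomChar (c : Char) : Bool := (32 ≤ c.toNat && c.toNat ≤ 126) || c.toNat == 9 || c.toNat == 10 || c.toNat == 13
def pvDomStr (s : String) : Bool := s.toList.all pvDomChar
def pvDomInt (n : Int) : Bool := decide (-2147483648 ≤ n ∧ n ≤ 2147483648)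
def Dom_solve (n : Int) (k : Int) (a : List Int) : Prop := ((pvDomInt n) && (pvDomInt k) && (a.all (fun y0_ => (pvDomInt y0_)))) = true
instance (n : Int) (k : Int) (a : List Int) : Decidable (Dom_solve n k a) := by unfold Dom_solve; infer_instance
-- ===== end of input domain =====

-- B composes the four-periodic alternating affine maps and applies one of them in a single pass.

-- ===== PORT A =====
-- A's loop body: on even i map x ↦ max_val - x, on odd i map x ↦ x - min_val
def aLoopBody (M m : Int) (acc : List Int) (i : Int) : List Int :=
  if PySem.Int.mod i 2 == 0 then acc.map (fun x => M - x) else acc.map (fun x => x - m)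

def solve (n : Int) (k : Int) (a : List Int) : List Int :=
  match PySem.List.max? a (fun x => x), PySem.List.min? a (fun x => x) with
  | some M, some m => (PySem.List.pyRange 0 k 1).foldl (aLoopBody M m) a
  | _, _ => []   -- unreachable: Pre_solve requires a ≠ [] (Python's max/min raise on [])

-- ===== PORT B =====
def solve_alt (n : Int) (k : Int) (a : List Int) : List Int :=
  match PySem.List.max? a (fun x => x) with
  | none => []   -- unreachable under Pre_solve
  | some M =>
    match PySem.List.min? a (fun x => x) with
    | none => []   -- unreachable under Pre_solve
    | some m =>
      let r : Int := if k > 0 then PySem.Int.mod k 4 else 0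
      if r == 0 then a
      else if r == 1 then a.map (fun x => M - x)
      else if r == 2 then a.map (fun x => M - x - m)
      else a.map (fun x => m + x)

-- ===== PRECONDITION & SPEC =====
-- Pre_ excludes only a = [], where Python's max(a) raises ValueError (in both A and B).
def Pre_solve (n : Int) (k : Int) (a : List Int) : Prop := a ≠ []
instance (n : Int) (k : Int) (a : List Int) : Decidable (Pre_solve n k a) := by unfold Pre_solve; infer_instance
def pvWitness_solve : Int × Int × List Int := (0, 3, [1, 2])

def Spec_solve (n : Int) (k : Int) (a : List Int) (out : List Int) : Prop := out = solve_alt n k a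
instance (n : Int) (k : Int) (a : List Int) (out : List Int) : Decidable (Spec_solve n k a out) := by unfold Spec_solve; infer_instance

-- ===== CLAIM (what is proved, stated in full; the proofs are below) =====
def Claim_equal_solve : Prop := ∀ (n : Int) (k : Int) (a : List Int), Dom_solve n k a → Pre_solve n k a → Spec_solve n k a (solve n k a)

-- ===== LEMMAS AND PROOFS =====

-- the composed map after j iterations, by j % 4
def phase (M m : Int) (r : Nat) (a : List Int) : List Int :=
  if r = 0 then a
  else if r = 1 then a.map (fun x => M - x)
  else if r = 2 then a.map (fun x => M - x - m)
  else a.map (fun x => m + x)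

theorem step_even (M m : Int) (acc : List Int) (j : Nat) (hj : j % 2 = 0) :
    aLoopBody M m acc (Int.ofNat j) = acc.map (fun x => M - x) := by
  have h : Int.fmod (j:Int) 2 = 0 := by rw [Int.fmod_eq_emod]; simp; omega
  simp [aLoopBody, PySem.Int.mod, h]

theorem step_odd (M m : Int) (acc : List Int) (j : Nat) (hj : j % 2 = 1) :
    aLoopBody M m acc (Int.ofNat j) = acc.map (fun x => x - m) := by
  have h : Int.fmod (j:Int) 2 = 1 := by rw [Int.fmod_eq_emod]; simp; omega
  simp [aLoopBody, PySem.Int.mod, h]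

theorem foldl_range_phase (M m : Int) (j : Nat) (a : List Int) :
    ((List.range j).map (Int.ofNat)).foldl (aLoopBody M m) a = phase M m (j % 4) a := by
  induction j with
  | zero => simp [phase]
  | succ j ih =>
    rw [List.range_succ, List.map_append, List.foldl_append, ih]
    simp only [List.map_cons, List.map_nil, List.foldl_cons, List.foldl_nil]
    have h4 : (j + 1) % 4 = (j % 4 + 1) % 4 := by omega
    rw [h4]
    have hlt : j % 4 < 4 := Nat.mod_lt j (by norm_num)
    interval_cases h : (j % 4)
    · rw [step_even M m _ j (by omega)]; simp [phase]
    · rw [step_odd M m _ j (by omega)]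
      simp [phase, List.map_map, Function.comp_def]
    · rw [step_even M m _ j (by omega)]
      simp [phase, List.map_map, Function.comp_def]
      intro x _; ring
    · rw [step_odd M m _ j (by omega)]
      simp only [phase]
      have hid : ((fun x : Int => x - m) ∘ fun x => m + x) = id := by
        funext x; simp
      simp [hid]

theorem pyRange_cast (k : Int) :
    PySem.List.pyRange 0 k 1 = (List.range k.toNat).map (Int.ofNat) := by
  rw [PySem.List.pyRange_one]
  simp

theorem mod4_toNat (k : Int) (hk : 0 < k) : k.toNat % 4 = (PySem.Int.mod k 4).toNat := by
  unfold PySem.Int.mod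
  rw [Int.fmod_eq_emod]; simp; omega

-- ===== VERDICT (by name: the statement is the Claim_ definition above) =====
theorem solve_spec : Claim_equal_solve := by
  intro n k a _ hpre
  unfold Spec_solve solve solve_alt
  have hne : a ≠ [] := hpre
  cases hM : PySem.List.max? a (fun x => x) with
  | none => exact absurd ((PySem.List.max?_eq_none_iff a _).mp hM) hne
  | some M =>
    cases hm : PySem.List.min? a (fun x => x) with
    | none => exact absurd ((PySem.List.min?_eq_none_iff a _).mp hm) hne
    | some m =>
      dsimp only
      rw [pyRange_cast, foldl_range_phase]
      by_cases hk : k > 0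
      · rw [mod4_toNat k hk]
        have hm4 : 0 ≤ PySem.Int.mod k 4 ∧ PySem.Int.mod k 4 < 4 := by
          unfold PySem.Int.mod; rw [Int.fmod_eq_emod]; simp; omega
        simp only [if_pos hk]
        rcases hm4 with ⟨h0, h4⟩
        interval_cases h : (PySem.Int.mod k 4) <;> simp [phase]
      · have h0 : k.toNat = 0 := by omega
        simp [h0, phase, hk]
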